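-- pv_equiv track=rewrite | github.com/mgregory1994/RenderWatch | src/render_watch/encoding/encoder.py | __get_file_size_in_kilobytes
-- ===== SOURCE A (Python) =====
-- def __get_file_size_in_kilobytes(ffmpeg_process_stdout):
--     try:
--         file_size_identifier = 'kB'
--         file_size_index = None
--
--         for index, stdout_chunk in enumerate(ffmpeg_process_stdout):
--             if file_size_identifier in stdout_chunk:
--                 file_size_index = index
--
--         if file_size_index is not None:
--             file_size_line = ffmpeg_process_stdout[file_size_index].split(' ')
--             file_size = file_size_line[-2].split('k')[0]
--
--             return int(file_size)
--         else:
--             return 0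
--     except:
--         return 0
-- ===== SOURCE B (Python) =====
-- def __get_file_size_in_kilobytes(ffmpeg_process_stdout):
--     try:
--         for stdout_chunk in reversed(ffmpeg_process_stdout):
--             if 'kB' in stdout_chunk:
--                 file_size_line = stdout_chunk.split(' ')
--                 file_size = file_size_line[-2].split('k')[0]
--                 return int(file_size)
--         return 0
--     except:
--         return 0
-- ===== Notes on version B (the rewrite author's own statement) =====
-- stated objective: simpler
-- what changed: Replaces the forward enumerate loop that keeps overwriting a 'last seen kB' index (then re-indexes the list) with a reverse scan that returns at the first chunk containing 'kB', applying the identical parse; no index variable is maintained.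
import Mathlib
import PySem

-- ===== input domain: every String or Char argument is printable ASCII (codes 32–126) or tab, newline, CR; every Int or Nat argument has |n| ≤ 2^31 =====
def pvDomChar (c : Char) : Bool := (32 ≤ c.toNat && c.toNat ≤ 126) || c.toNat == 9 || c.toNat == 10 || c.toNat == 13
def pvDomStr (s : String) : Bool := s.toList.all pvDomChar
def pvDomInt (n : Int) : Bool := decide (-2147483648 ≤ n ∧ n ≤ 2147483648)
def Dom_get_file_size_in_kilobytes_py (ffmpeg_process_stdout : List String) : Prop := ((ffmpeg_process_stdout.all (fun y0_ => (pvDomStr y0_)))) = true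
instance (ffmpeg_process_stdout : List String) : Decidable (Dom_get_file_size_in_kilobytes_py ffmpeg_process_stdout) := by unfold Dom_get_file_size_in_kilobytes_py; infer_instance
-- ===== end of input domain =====

-- B replaces A's forward scan that keeps overwriting a 'last seen kB' index with a reverse
-- scan returning at the first matching chunk (objective: simpler — no maintained index).

-- ===== PORT A =====
-- forward enumerate loop, remembering the index of the last chunk containing 'kB';
-- every possibly-raising step (the [-2] index, int()) yields 0 via the bare except.
def get_file_size_in_kilobytes_py (ffmpeg_process_stdout : List String) : Int :=
  let file_size_index :=
    (PySem.List.enumerate ffmpeg_process_stdout 0).foldl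
      (fun acc p => if PySem.Str.isIn "kB" p.2 then some p.1 else acc)
      (none : Option Int)
  match file_size_index with
  | none => 0
  | some i =>
    match PySem.List.pyGet? ffmpeg_process_stdout i with
    | none => 0
    | some chunk =>
      let file_size_line := PySem.Chars.splitOn chunk.toList [' ']
      match PySem.List.pyGet? file_size_line (-2) with
      | none => 0  -- IndexError → except → 0
      | some piece =>
        match PySem.List.pyGet? (PySem.Chars.splitOn piece ['k']) 0 with
        | none => 0
        | some fs => (PySem.Int.ofChars? fs).getD 0  -- ValueError → except → 0

-- ===== PORT B =====
-- first chunk of the reversed list that contains 'kB'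
def pvFindKB : List String → Option String
  | [] => none
  | c :: rest => if PySem.Str.isIn "kB" c then some c else pvFindKB rest

def get_file_size_in_kilobytes_py_alt (ffmpeg_process_stdout : List String) : Int :=
  match pvFindKB ffmpeg_process_stdout.reverse with
  | none => 0
  | some stdout_chunk =>
    let file_size_line := PySem.Chars.splitOn stdout_chunk.toList [' ']
    match PySem.List.pyGet? file_size_line (-2) with
    | none => 0  -- IndexError → except → 0
    | some piece =>
      match PySem.List.pyGet? (PySem.Chars.splitOn piece ['k']) 0 with
      | none => 0
      | some fs => (PySem.Int.ofChars? fs).getD 0  -- ValueError → except → 0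

-- ===== PRECONDITION & SPEC =====
def Spec_get_file_size_in_kilobytes_py (ffmpeg_process_stdout : List String) (out : Int) : Prop := out = get_file_size_in_kilobytes_py_alt ffmpeg_process_stdout
instance (ffmpeg_process_stdout : List String) (out : Int) : Decidable (Spec_get_file_size_in_kilobytes_py ffmpeg_process_stdout out) := by unfold Spec_get_file_size_in_kilobytes_py; infer_instance

-- ===== CLAIM (what is proved, stated in full; the proofs are below) =====
def Claim_equal_get_file_size_in_kilobytes_py : Prop := ∀ (ffmpeg_process_stdout : List String), Dom_get_file_size_in_kilobytes_py ffmpeg_process_stdout → Spec_get_file_size_in_kilobytes_py ffmpeg_process_stdout (get_file_size_in_kilobytes_py ffmpeg_process_stdout)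

-- ===== LEMMAS AND PROOFS =====

-- A's loop, named for the proofs
def pvLoopA (xs : List String) : Option Int :=
  (PySem.List.enumerate xs 0).foldl
    (fun acc p => if PySem.Str.isIn "kB" p.2 then some p.1 else acc)
    (none : Option Int)

theorem pvLoopA_concat (xs : List String) (x : String) :
    pvLoopA (xs ++ [x]) =
      if PySem.Str.isIn "kB" x then some (xs.length : Int) else pvLoopA xs := by
  unfold pvLoopA
  rw [PySem.List.enumerate_append, List.foldl_append]
  simp [PySem.List.enumerate]

theorem pvLoopA_bound (xs : List String) (i : Int) (h : pvLoopA xs = some i) :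
    ∃ k : Nat, i = (k : Int) ∧ k < xs.length := by
  induction xs using List.reverseRecOn with
  | nil => simp [pvLoopA, PySem.List.enumerate] at h
  | append_singleton xs x ih =>
    rw [pvLoopA_concat] at h
    by_cases hx : PySem.Chars.isIn ['k', 'B'] x.toList = true
    · simp [hx] at h
      exact ⟨xs.length, by omega, by simp⟩
    · simp [hx] at h
      obtain ⟨k, hk, hlt⟩ := ih h
      exact ⟨k, hk, by simp; omega⟩

-- the chunk A finally indexes = the first 'kB' chunk of the reversed list
theorem pvChunk_eq (xs : List String) :
    (pvLoopA xs).bind (fun i => PySem.List.pyGet? xs i) = pvFindKB xs.reverse := by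
  induction xs using List.reverseRecOn with
  | nil => simp [pvLoopA, PySem.List.enumerate, pvFindKB]
  | append_singleton xs x ih =>
    rw [pvLoopA_concat, List.reverse_append]
    by_cases hx : PySem.Chars.isIn ['k', 'B'] x.toList = true
    · simp [hx, pvFindKB]
    · simp only [List.reverse_singleton, List.singleton_append, pvFindKB, PySem.Str.isIn_eq]
      rw [← ih]
      cases hl : pvLoopA xs with
      | none => simp [hx]
      | some i =>
        obtain ⟨k, rfl, hlt⟩ := pvLoopA_bound xs i hl
        simp [hx, PySem.List.pyGet?_natCast, List.getElem?_append_left hlt]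

-- ===== VERDICT (by name: the statement is the Claim_ definition above) =====
theorem get_file_size_in_kilobytes_py_spec : Claim_equal_get_file_size_in_kilobytes_py := by
  intro xs _
  unfold Spec_get_file_size_in_kilobytes_py get_file_size_in_kilobytes_py get_file_size_in_kilobytes_py_alt
  rw [← pvChunk_eq]
  have hfold : (PySem.List.enumerate xs 0).foldl
      (fun acc p => if PySem.Str.isIn "kB" p.2 then some p.1 else acc)
      (none : Option Int) = pvLoopA xs := rfl
  rw [hfold]
  cases pvLoopA xs with
  | none => rfl
  | some i => cases PySem.List.pyGet? xs i <;> rfl
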